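-- pv_equiv track=rewrite | github.com/MurtazaKafka/l-shape-ramsey-solver | ramsey_theory/monochomatic.py | get_monochromatic_cliques
-- ===== SOURCE A (Python) =====
-- from itertools import combinations
--
-- def get_monochromatic_cliques(matrix, clique_size: int):
--     """
--     Returns a list of monochromatic cliques (as tuples of vertices)
--     in the graph.
--     """
--     n = len(matrix)
--     cliques = []
--     for vertices in combinations(range(n), clique_size):
--         colors = [matrix[i][j] for i, j in combinations(vertices, 2)]
--         if len(set(colors)) == 1:
--             cliques.append(vertices)
--     return cliques
-- ===== SOURCE B (Python) =====
-- def get_monochromatic_cliques(matrix, clique_size: int):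
--     """
--     Returns a list of monochromatic cliques (as tuples of vertices)
--     in the graph, by recursive backtracking: fix the color from the
--     first edge, then extend the clique with strictly larger vertices
--     compatible with that color.
--     """
--     n = len(matrix)
--     if clique_size < 2 or clique_size > n:
--         return []
--
--     def grow(color, clique, fuel, candidates):
--         # `clique` is already a clique of color `color`; extend it by `fuel`
--         # vertices taken (in increasing order) from `candidates`.
--         if fuel == 0:
--             return [tuple(clique)]
--         if not candidates:
--             return []
--         v, rest = candidates[0], candidates[1:]
--         out = []
--         if all(matrix[u][v] == color for u in clique):
--             out = grow(color, clique + [v], fuel - 1, rest)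
--         return out + grow(color, clique, fuel, rest)
--
--     result = []
--     for i in range(n):
--         for j in range(i + 1, n):
--             result += grow(matrix[i][j], [i, j], clique_size - 2, list(range(j + 1, n)))
--     return result
-- ===== Notes on version B (the rewrite author's own statement) =====
-- stated objective: alternative
-- what changed: Replaces A's enumeration of all C(n,k) vertex subsets with a recursive backtracking clique search that fixes the color from the first edge and only extends partial cliques with larger vertices compatible with that color, pruning dead branches early.
import Mathlib
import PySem

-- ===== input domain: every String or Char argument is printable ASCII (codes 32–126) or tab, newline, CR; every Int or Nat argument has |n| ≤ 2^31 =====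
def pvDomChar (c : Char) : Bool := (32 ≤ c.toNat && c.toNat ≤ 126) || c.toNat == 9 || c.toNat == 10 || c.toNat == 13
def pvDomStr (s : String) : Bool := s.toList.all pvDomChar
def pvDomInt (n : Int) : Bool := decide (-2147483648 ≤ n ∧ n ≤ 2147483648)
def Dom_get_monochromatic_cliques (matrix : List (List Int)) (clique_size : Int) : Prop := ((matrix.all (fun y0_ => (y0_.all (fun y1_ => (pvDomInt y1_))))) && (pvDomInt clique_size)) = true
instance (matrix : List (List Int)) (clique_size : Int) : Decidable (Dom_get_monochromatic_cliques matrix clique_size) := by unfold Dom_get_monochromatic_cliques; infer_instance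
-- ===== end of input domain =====

-- B replaces A's brute-force scan of all C(n,k) subsets with a pruned recursive
-- backtracking clique search (fix the color from the first edge, extend with larger
-- compatible vertices); same output, same order.

-- ===== PORT A =====
-- matrix[i][j] (indices are in range on every input admitted by Pre_)
def pvMGet (m : List (List Int)) (i j : Int) : Int :=
  PySem.List.pyGetD (PySem.List.pyGetD m i []) j 0

-- itertools.combinations(xs, k) in lexicographic order
def pvComb : List Int → Nat → List (List Int)
  | _, 0 => [[]]
  | [], _+1 => []
  | x :: xs, k+1 => ((pvComb xs k).map (fun t => x :: t)) ++ pvComb xs (k+1)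

-- itertools.combinations(xs, 2), as pairs
def pvPairs : List Int → List (Int × Int)
  | [] => []
  | x :: xs => (xs.map (fun y => (x, y))) ++ pvPairs xs

def get_monochromatic_cliques (matrix : List (List Int)) (clique_size : Int) : List (List Int) :=
  let n := matrix.length
  (pvComb ((List.range n).map Int.ofNat) clique_size.toNat).filter
    (fun vs =>
      (PySem.Set.ofList ((pvPairs vs).map (fun p => pvMGet matrix p.1 p.2))).length == 1)

-- ===== PORT B =====
-- grow(color, clique, fuel, candidates) from Source B
def pvGrow (m : List (List Int)) (c : Int) : Nat → List Int → List Int → List (List Int)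
  | 0, clique, _ => [clique]
  | _+1, _, [] => []
  | fuel+1, clique, v :: rest =>
      (if clique.all (fun u => pvMGet m u v == c) then
        pvGrow m c fuel (clique ++ [v]) rest
      else []) ++ pvGrow m c (fuel+1) clique rest

def get_monochromatic_cliques_alt (matrix : List (List Int)) (clique_size : Int) : List (List Int) :=
  let n := matrix.length
  if clique_size < 2 || (n : Int) < clique_size then []
  else
    (List.range n).flatMap (fun i =>
      (List.range' (i+1) (n - (i+1))).flatMap (fun j =>
        pvGrow matrix (pvMGet matrix (Int.ofNat i) (Int.ofNat j)) (clique_size - 2).toNat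
          [Int.ofNat i, Int.ofNat j] ((List.range' (j+1) (n - (j+1))).map Int.ofNat)))

-- ===== PRECONDITION & SPEC =====
-- Pre_ excludes exactly the inputs where Python A raises: a negative clique_size
-- (ValueError from combinations) and, whenever some pair of vertices is actually
-- enumerated (2 ≤ clique_size ≤ n), any row other than the last shorter than n
-- (IndexError on matrix[i][j]).
def Pre_get_monochromatic_cliques (matrix : List (List Int)) (clique_size : Int) : Prop :=
  0 ≤ clique_size ∧
  (2 ≤ clique_size ∧ clique_size ≤ (matrix.length : Int) →
    ∀ row ∈ matrix.dropLast, (matrix.length : Int) ≤ (row.length : Int))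
instance (matrix : List (List Int)) (clique_size : Int) : Decidable (Pre_get_monochromatic_cliques matrix clique_size) := by unfold Pre_get_monochromatic_cliques; infer_instance

def pvWitness_get_monochromatic_cliques : List (List Int) × Int := ([[0, 1], [1, 0]], 2)

def Spec_get_monochromatic_cliques (matrix : List (List Int)) (clique_size : Int) (out : List (List Int)) : Prop := out = get_monochromatic_cliques_alt matrix clique_size
instance (matrix : List (List Int)) (clique_size : Int) (out : List (List Int)) : Decidable (Spec_get_monochromatic_cliques matrix clique_size out) := by unfold Spec_get_monochromatic_cliques; infer_instance

-- ===== CLAIM (what is proved, stated in full; the proofs are below) =====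
def Claim_equal_get_monochromatic_cliques : Prop := ∀ (matrix : List (List Int)) (clique_size : Int), Dom_get_monochromatic_cliques matrix clique_size → Pre_get_monochromatic_cliques matrix clique_size → Spec_get_monochromatic_cliques matrix clique_size (get_monochromatic_cliques matrix clique_size)


-- ===== LEMMAS AND PROOFS =====

-- the incremental color check performed by pvGrow along an extension q of clique p
def pvExt (m : List (List Int)) (c : Int) : List Int → List Int → Bool
  | _, [] => true
  | p, v :: q => (p.all (fun u => pvMGet m u v == c)) && pvExt m c (p ++ [v]) q

-- (head, tail-suffix) splits of a list
def pvSplits : List Int → List (Int × List Int)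
  | [] => []
  | x :: xs => (x, xs) :: pvSplits xs

theorem pvComb_nil_of_short (xs : List Int) (k : Nat) (h : xs.length < k) :
    pvComb xs k = [] := by
  induction xs generalizing k with
  | nil => cases k with
    | zero => omega
    | succ k => rfl
  | cons x xs ih =>
    cases k with
    | zero => omega
    | succ k =>
      simp only [pvComb]
      rw [ih k (by simpa using h), ih (k+1) (by simp at h ⊢; omega)]
      simp

theorem pvComb_one (xs : List Int) : pvComb xs 1 = xs.map (fun x => [x]) := by
  induction xs with
  | nil => rfl
  | cons x xs ih => simp [pvComb, ih]

theorem pvComb_succ (xs : List Int) (k : Nat) :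
    pvComb xs (k+1) = (pvSplits xs).flatMap (fun s => (pvComb s.2 k).map (fun t => s.1 :: t)) := by
  induction xs with
  | nil => rfl
  | cons x xs ih => simp [pvComb, pvSplits, ih]

theorem pvComb_two (xs : List Int) (k : Nat) :
    pvComb xs (k+2) = (pvSplits xs).flatMap (fun s =>
      (pvSplits s.2).flatMap (fun t => (pvComb t.2 k).map (fun q => s.1 :: t.1 :: q))) := by
  rw [pvComb_succ xs (k+1)]
  apply List.flatMap_congr
  intro s _
  rw [pvComb_succ s.2 k, List.map_flatMap]
  apply List.flatMap_congr
  intro t _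
  rw [List.map_map]
  rfl

theorem pvGrow_eq (m : List (List Int)) (c : Int) (vs : List Int) :
    ∀ (fuel : Nat) (p : List Int),
      pvGrow m c fuel p vs = ((pvComb vs fuel).filter (pvExt m c p)).map (fun q => p ++ q) := by
  induction vs with
  | nil =>
    intro fuel p
    cases fuel with
    | zero => simp [pvGrow, pvComb, pvExt]
    | succ fuel => simp [pvGrow, pvComb]
  | cons v rest ih =>
    intro fuel p
    cases fuel with
    | zero => simp [pvGrow, pvComb, pvExt]
    | succ fuel =>
      simp only [pvGrow, pvComb, List.filter_append, List.map_append]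
      congr 1
      · rw [List.filter_map, List.map_map]
        by_cases h : p.all (fun u => pvMGet m u v == c) = true
        · rw [if_pos h, ih fuel (p ++ [v])]
          rw [show (pvExt m c p ∘ fun t => v :: t) = pvExt m c (p ++ [v]) by
            funext q; simp [pvExt, h]]
          apply List.map_congr_left
          intro q _
          simp [Function.comp]
        · rw [if_neg h]
          have hf : (pvComb rest fuel).filter (pvExt m c p ∘ fun t => v :: t) = [] := by
            apply List.filter_eq_nil_iff.mpr
            intro q _
            simp only [Bool.not_eq_true] at h
            simp [pvExt, h]
          rw [hf]; rfl
      · exact ih (fuel+1) p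

theorem pvPairs_mem_append (p q : List Int) (a b : Int) :
    (a, b) ∈ pvPairs (p ++ q) ↔
      (a, b) ∈ pvPairs p ∨ (a ∈ p ∧ b ∈ q) ∨ (a, b) ∈ pvPairs q := by
  induction p with
  | nil => simp [pvPairs]
  | cons x xs ih =>
    simp only [List.cons_append, pvPairs, List.mem_append, List.mem_map, List.mem_cons,
      Prod.mk.injEq, ih]
    constructor
    · rintro (⟨y, hy, rfl, rfl⟩ | h)
      · rcases hy with h1 | h2
        · exact Or.inl (Or.inl ⟨y, h1, rfl, rfl⟩)
        · exact Or.inr (Or.inl ⟨Or.inl rfl, h2⟩)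
      · rcases h with h | h | h
        · exact Or.inl (Or.inr h)
        · exact Or.inr (Or.inl ⟨Or.inr h.1, h.2⟩)
        · exact Or.inr (Or.inr h)
    · rintro ((⟨y, hy, rfl, rfl⟩ | h) | ⟨(rfl | ha), hb⟩ | h)
      · exact Or.inl ⟨y, Or.inl hy, rfl, rfl⟩
      · exact Or.inr (Or.inl h)
      · exact Or.inl ⟨b, Or.inr hb, rfl, rfl⟩
      · exact Or.inr (Or.inr (Or.inl ⟨ha, hb⟩))
      · exact Or.inr (Or.inr (Or.inr h))

theorem pvExt_iff (m : List (List Int)) (c : Int) (q : List Int) :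
    ∀ p : List Int, (∀ pr ∈ pvPairs p, pvMGet m pr.1 pr.2 = c) →
      (pvExt m c p q = true ↔ ∀ pr ∈ pvPairs (p ++ q), pvMGet m pr.1 pr.2 = c) := by
  induction q with
  | nil =>
    intro p hp
    simpa [pvExt] using hp
  | cons v q ih =>
    intro p hp
    simp only [pvExt, Bool.and_eq_true]
    by_cases h : p.all (fun u => pvMGet m u v == c) = true
    · have hall : ∀ u ∈ p, pvMGet m u v = c := by
        intro u hu
        simpa using List.all_eq_true.mp h u hu
      have hp' : ∀ pr ∈ pvPairs (p ++ [v]), pvMGet m pr.1 pr.2 = c := by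
        rintro ⟨a, b⟩ hab
        rcases (pvPairs_mem_append p [v] a b).mp hab with h1 | ⟨ha, hb⟩ | h3
        · exact hp _ h1
        · simp at hb; subst hb; exact hall a ha
        · simp [pvPairs] at h3
      rw [show p ++ v :: q = (p ++ [v]) ++ q by simp]
      constructor
      · rintro ⟨-, h2⟩
        exact (ih (p ++ [v]) hp').mp h2
      · intro hall2
        exact ⟨h, (ih (p ++ [v]) hp').mpr hall2⟩
    · constructor
      · rintro ⟨h1, -⟩; exact absurd h1 h
      · intro hall2
        exfalso
        apply h
        apply List.all_eq_true.mpr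
        intro u hu
        have : (u, v) ∈ pvPairs (p ++ v :: q) :=
          (pvPairs_mem_append p (v :: q) u v).mpr (Or.inr (Or.inl ⟨hu, by simp⟩))
        simpa using hall2 _ this

-- a deduplicated nonempty list has length 1 iff every element equals the head
theorem pvSetLen_one (c : Int) (rest : List Int) :
    (PySem.Set.ofList (c :: rest)).length = 1 ↔ ∀ x ∈ rest, x = c := by
  constructor
  · intro h1
    obtain ⟨a, ha⟩ := List.length_eq_one_iff.mp h1
    have hc : c ∈ PySem.Set.ofList (c :: rest) := by
      rw [PySem.Set.mem_ofList]; simp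
    rw [ha] at hc; simp at hc
    intro x hx
    have hxm : x ∈ PySem.Set.ofList (c :: rest) := by
      rw [PySem.Set.mem_ofList]; simp [hx]
    rw [ha] at hxm; simp at hxm
    omega
  · intro hall
    have hmem : ∀ x ∈ PySem.Set.ofList (c :: rest), x = c := by
      intro x hx
      rw [PySem.Set.mem_ofList] at hx
      rcases List.mem_cons.mp hx with rfl | hx
      · rfl
      · exact hall x hx
    have hnd : (PySem.Set.ofList (c :: rest)).Nodup := PySem.Set.nodup_ofList _
    have hc : c ∈ PySem.Set.ofList (c :: rest) := by
      rw [PySem.Set.mem_ofList]; simp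
    cases hs : PySem.Set.ofList (c :: rest) with
    | nil => rw [hs] at hc; simp at hc
    | cons a t =>
      rw [hs] at hmem hnd
      have ha : a = c := hmem a (by simp)
      have ht : t = [] := by
        cases t with
        | nil => rfl
        | cons b t' =>
          have hb : b = c := hmem b (by simp)
          rw [List.nodup_cons] at hnd
          exact absurd (by simp [ha, hb]) hnd.1
      simp [ht]

-- A's monochromaticity test on i :: j :: q equals B's incremental check
theorem pvMono_eq_ext (m : List (List Int)) (i j : Int) (q : List Int) :
    ((PySem.Set.ofList ((pvPairs (i :: j :: q)).map (fun p => pvMGet m p.1 p.2))).length == 1)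
      = pvExt m (pvMGet m i j) [i, j] q := by
  have hbase : ∀ pr ∈ pvPairs [i, j], pvMGet m pr.1 pr.2 = pvMGet m i j := by
    rintro ⟨a, b⟩ hab
    simp [pvPairs] at hab
    rw [hab.1, hab.2]
  have hpairs : pvPairs (i :: j :: q) = (i, j) :: (q.map (fun y => (i, y)) ++ pvPairs (j :: q)) := by
    simp [pvPairs]
  have hcons : ([i, j] : List Int) ++ q = i :: j :: q := rfl
  rw [Bool.eq_iff_iff, beq_iff_eq, hpairs, List.map_cons, pvSetLen_one,
    pvExt_iff m (pvMGet m i j) q [i, j] hbase, hcons]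
  constructor
  · intro h pr hpr
    rw [hpairs] at hpr
    rcases List.mem_cons.mp hpr with rfl | htl
    · rfl
    · exact h _ (List.mem_map_of_mem htl)
  · intro h x hx
    obtain ⟨pr, hpr, rfl⟩ := List.mem_map.mp hx
    exact h pr (by rw [hpairs]; exact List.mem_cons_of_mem _ hpr)

-- the splits of a mapped range, as the double loop B runs
theorem pvSplits_range {β : Type} (f : Int × List Int → List β) :
    ∀ (len s : Nat),
      (pvSplits ((List.range' s len).map Int.ofNat)).flatMap f
        = (List.range' s len).flatMap
            (fun i => f (Int.ofNat i, (List.range' (i+1) (s + len - (i+1))).map Int.ofNat)) := by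
  intro len
  induction len with
  | zero => intro s; rfl
  | succ len ih =>
    intro s
    rw [List.range'_succ]
    simp only [List.map_cons, pvSplits, List.flatMap_cons]
    congr 1
    · have : s + (len + 1) - (s + 1) = len := by omega
      rw [this]
    · rw [ih (s+1)]
      apply List.flatMap_congr
      intro i hi
      have : s + 1 + len - (i + 1) = s + (len + 1) - (i + 1) := by omega
      rw [this]

-- pushing A's filter through the double decomposition gives exactly one pvGrow call
theorem pvInner_eq (m : List (List Int)) (k' : Nat) (i j : Int) (lj : List Int) :
    ((pvComb lj k').map (fun q => i :: j :: q)).filter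
        (fun vs => (PySem.Set.ofList ((pvPairs vs).map (fun p => pvMGet m p.1 p.2))).length == 1)
      = pvGrow m (pvMGet m i j) k' [i, j] lj := by
  rw [List.filter_map, pvGrow_eq]
  rw [show ((fun vs => (PySem.Set.ofList ((pvPairs vs).map (fun p => pvMGet m p.1 p.2))).length == 1)
        ∘ fun q => i :: j :: q) = pvExt m (pvMGet m i j) [i, j] by
    funext q; exact pvMono_eq_ext m i j q]
  apply List.map_congr_left
  intro q _
  rfl


-- ===== VERDICT (by name: the statement is the Claim_ definition above) =====
theorem get_monochromatic_cliques_spec : Claim_equal_get_monochromatic_cliques := by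
  intro matrix clique_size _ hpre
  unfold Spec_get_monochromatic_cliques
  obtain ⟨h0, _⟩ := hpre
  simp only [get_monochromatic_cliques, get_monochromatic_cliques_alt]
  by_cases hlo : clique_size < 2
  · -- clique_size is 0 or 1: no pair of vertices, A's color-set test always fails
    rw [if_pos (by simp [hlo])]
    have : clique_size = 0 ∨ clique_size = 1 := by omega
    rcases this with rfl | rfl
    · simp [pvComb, pvPairs, PySem.Set.ofList]
    · rw [show (1 : Int).toNat = 1 from rfl, pvComb_one, List.filter_map]
      have : ((List.range matrix.length).map Int.ofNat).filter
          ((fun vs => (PySem.Set.ofList ((pvPairs vs).map (fun p => pvMGet matrix p.1 p.2))).length == 1)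
            ∘ fun x => [x]) = [] := by
        apply List.filter_eq_nil_iff.mpr
        intro x _
        simp [pvPairs, PySem.Set.ofList]
      rw [this]; rfl
  · by_cases hhi : (matrix.length : Int) < clique_size
    · -- clique_size exceeds the vertex count: there is no combination at all
      rw [if_pos (by simp [hhi]), pvComb_nil_of_short]
      · rfl
      · simp only [List.length_map, List.length_range]
        omega
    · rw [if_neg (by simp; omega)]
      have hk : clique_size.toNat = (clique_size - 2).toNat + 2 := by omega
      rw [hk, pvComb_two, List.filter_flatMap]
      rw [List.range_eq_range', pvSplits_range]
      apply List.flatMap_congr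
      intro i hi
      have hin : i < matrix.length := by
        have := List.mem_range'.mp hi
        omega
      rw [List.filter_flatMap, pvSplits_range]
      simp only [Nat.zero_add]
      apply List.flatMap_congr
      intro j hj
      have hjn : j < matrix.length ∧ i + 1 ≤ j := by
        have := List.mem_range'.mp hj
        omega
      have h1 : i + 1 + (matrix.length - (i + 1)) - (j + 1) = matrix.length - (j + 1) := by omega
      rw [h1]
      exact pvInner_eq matrix ((clique_size - 2).toNat) (Int.ofNat i) (Int.ofNat j) _
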